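-- pv_equiv track=rewrite | github.com/ivangushkov/tex2qti2tex | tex2qti.py | get_nr_of_questions
-- ===== SOURCE A (Python) =====
-- def get_nr_of_questions(lines):
--     nq = 0
--
--     index_pairs = []
--     for i,element in enumerate(lines):
--         if "begin""{""IndexedQuestion}" in element:
--             nq += 1
--             remaining_lines = lines[i:]
--             for j,remaining_line in enumerate(remaining_lines):
--                 if "\end""{""IndexedQuestion""}" in remaining_line:
--                     index_pair = [i,int(i+j+1)]
--                     index_pairs.append(index_pair)
--                     break
--
--     return index_pairs,nq # works
-- ===== SOURCE B (Python) =====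
-- def get_nr_of_questions(lines):
--     begins = []
--     ends = []
--     for i, line in enumerate(lines):
--         if "begin{IndexedQuestion}" in line:
--             begins.append(i)
--         if "\end{IndexedQuestion}" in line:
--             ends.append(i)
--     pairs = []
--     k = 0
--     for b in begins:
--         while k < len(ends) and ends[k] < b:
--             k += 1
--         if k < len(ends):
--             pairs.append([b, ends[k] + 1])
--     return pairs, len(begins)
-- ===== Notes on version B (the rewrite author's own statement) =====
-- stated objective: alternative
-- what changed: Instead of rescanning the whole tail lines[i:] for the end marker at every begin marker, B makes one pass collecting the indices of begin and end markers and then pairs them with a linear two-pointer merge (first end index >= each begin index).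
import Mathlib
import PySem

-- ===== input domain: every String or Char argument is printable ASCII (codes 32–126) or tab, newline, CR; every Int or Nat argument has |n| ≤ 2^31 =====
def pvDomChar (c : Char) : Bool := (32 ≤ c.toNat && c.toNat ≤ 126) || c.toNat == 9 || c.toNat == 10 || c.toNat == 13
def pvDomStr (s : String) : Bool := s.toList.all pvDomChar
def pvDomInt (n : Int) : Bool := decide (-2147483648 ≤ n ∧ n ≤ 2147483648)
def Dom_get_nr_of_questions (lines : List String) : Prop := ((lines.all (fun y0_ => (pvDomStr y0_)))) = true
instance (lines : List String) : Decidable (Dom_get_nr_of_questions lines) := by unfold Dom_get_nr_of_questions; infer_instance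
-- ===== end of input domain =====

-- B replaces A's rescan of lines[i:] at every begin marker by one pass collecting the
-- begin/end marker indices plus a two-pointer merge pairing them (objective: alternative).

-- ===== PORT A =====
-- inner loop: 'for j,remaining_line in enumerate(remaining_lines): if "\end{IndexedQuestion}" in remaining_line: … break'
def pvFindEnd (rem : List String) (j : Int) : Option Int :=
  match rem with
  | [] => none
  | l :: ls =>
    if PySem.Str.isIn "\\end{IndexedQuestion}" l then some j else pvFindEnd ls (j + 1)

def get_nr_of_questions (lines : List String) : List (List Int) × Int :=
  (PySem.List.enumerate lines 0).foldl
    (fun st p =>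
      if PySem.Str.isIn "begin{IndexedQuestion}" p.2 then
        let nq := st.2 + 1
        let rem := PySem.List.slice lines (some p.1) none
        match pvFindEnd rem 0 with
        | some j => (st.1 ++ [[p.1, p.1 + j + 1]], nq)
        | none => (st.1, nq)
      else st)
    ([], 0)

-- ===== PORT B =====
-- the single pass collecting indices of begin markers and of end markers
def pvScan (lines : List String) : List Int × List Int :=
  (PySem.List.enumerate lines 0).foldl
    (fun st p =>
      (if PySem.Str.isIn "begin{IndexedQuestion}" p.2 then st.1 ++ [p.1] else st.1,
       if PySem.Str.isIn "\\end{IndexedQuestion}" p.2 then st.2 ++ [p.1] else st.2))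
    ([], [])

-- the two-pointer merge ('while k < len(ends) and ends[k] < b: k += 1')
def pvTP (begins ends : List Int) : List (List Int) :=
  match begins, ends with
  | [], _ => []
  | _ :: _, [] => []
  | b :: bs, e :: es =>
    if e < b then pvTP (b :: bs) es else [b, e + 1] :: pvTP bs (e :: es)
termination_by begins.length + ends.length

def get_nr_of_questions_alt (lines : List String) : List (List Int) × Int :=
  let s := pvScan lines
  (pvTP s.1 s.2, (s.1.length : Int))

-- ===== PRECONDITION & SPEC =====
def Spec_get_nr_of_questions (lines : List String) (out : List (List Int) × Int) : Prop := out = get_nr_of_questions_alt lines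
instance (lines : List String) (out : List (List Int) × Int) : Decidable (Spec_get_nr_of_questions lines out) := by unfold Spec_get_nr_of_questions; infer_instance

-- ===== CLAIM (what is proved, stated in full; the proofs are below) =====
def Claim_equal_get_nr_of_questions : Prop := ∀ (lines : List String), Dom_get_nr_of_questions lines → Spec_get_nr_of_questions lines (get_nr_of_questions lines)

-- ===== LEMMAS AND PROOFS =====

def pvBegP (s : String) : Bool := PySem.Str.isIn "begin{IndexedQuestion}" s
def pvEndP (s : String) : Bool := PySem.Str.isIn "\\end{IndexedQuestion}" s

theorem pvBegP_eq (s : String) : PySem.Str.isIn "begin{IndexedQuestion}" s = pvBegP s := rfl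

-- indices (from offset `off`) of the lines satisfying `q`
def pvIdx (q : String → Bool) (off : Int) (ls : List String) : List Int :=
  ((PySem.List.enumerate ls off).filter (fun p => q p.2)).map (·.1)

theorem pvIdx_nil (q : String → Bool) (off : Int) : pvIdx q off [] = [] := by
  simp [pvIdx, PySem.List.enumerate_nil]

theorem pvIdx_cons (q : String → Bool) (off : Int) (l : String) (ls : List String) :
    pvIdx q off (l :: ls) =
      (if q l then [off] else []) ++ pvIdx q (off + 1) ls := by
  by_cases h : q l <;> simp [pvIdx, PySem.List.enumerate_cons, h]

theorem pvIdx_mem_le (q : String → Bool) (off : Int) (ls : List String) :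
    ∀ e ∈ pvIdx q off ls, off ≤ e := by
  induction ls generalizing off with
  | nil => simp [pvIdx_nil]
  | cons l t ih =>
    intro e he
    rw [pvIdx_cons] at he
    rcases List.mem_append.mp he with h | h
    · by_cases hq : q l <;> simp [hq] at h
      omega
    · have := ih (off + 1) e h; omega

theorem pvIdx_pairwise (q : String → Bool) (off : Int) (ls : List String) :
    (pvIdx q off ls).Pairwise (· ≤ ·) := by
  induction ls generalizing off with
  | nil => simp [pvIdx_nil]
  | cons l t ih =>
    rw [pvIdx_cons]
    refine List.pairwise_append.mpr ⟨?_, ih (off + 1), ?_⟩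
    · by_cases hq : q l <;> simp [hq]
    · intro a ha b hb
      have hb' := pvIdx_mem_le q (off + 1) t b hb
      by_cases hq : q l <;> simp [hq] at ha
      omega

theorem find?_congr' {α : Type} (l : List α) (p q : α → Bool) (h : ∀ x ∈ l, p x = q x) :
    l.find? p = l.find? q := by
  induction l with
  | nil => rfl
  | cons a t ih =>
    simp only [List.find?_cons, h a (by simp)]
    cases hq : q a
    · exact ih (fun x hx => h x (by simp [hx]))
    · rfl

theorem flatMap_if_eq_filter {α β : Type} (l : List α) (p : α → Bool) (g : α → List β) :
    l.flatMap (fun x => if p x then g x else []) = (l.filter p).flatMap g := by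
  induction l with
  | nil => rfl
  | cons a t ih => by_cases hp : p a <;> simp [hp, ih]

theorem pvFindEnd_cons (l : String) (t : List String) (j : Int) :
    pvFindEnd (l :: t) j =
      if PySem.Str.isIn "\\end{IndexedQuestion}" l then some j else pvFindEnd t (j + 1) := rfl

-- shift lemma for the inner search of A
theorem pvFindEnd_shift (ls : List String) (j : Int) :
    pvFindEnd ls j = (pvFindEnd ls 0).map (fun t => j + t) := by
  induction ls generalizing j with
  | nil => rfl
  | cons l t ih =>
    rw [pvFindEnd_cons, pvFindEnd_cons]
    by_cases h : PySem.Str.isIn "\\end{IndexedQuestion}" l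
    · rw [if_pos h, if_pos h]; simp
    · rw [if_neg h, if_neg h, ih (j + 1), show (0 : Int) + 1 = 1 from rfl, ih 1, Option.map_map]
      cases pvFindEnd t 0 <;> simp

-- first end-marker index ≥ off+k equals A's inner scan over the dropped list
theorem pvFind_drop (ls : List String) (off : Int) (k : Nat) :
    (pvIdx pvEndP off ls).find? (fun e => decide (off + (k : Int) ≤ e)) =
      (pvFindEnd (ls.drop k) 0).map (fun j => off + (k : Int) + j) := by
  induction ls generalizing off k with
  | nil => simp [pvIdx_nil, pvFindEnd]
  | cons l t ih =>
    rw [pvIdx_cons]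
    cases k with
    | zero =>
      by_cases h : pvEndP l
      · rw [if_pos h, List.singleton_append,
          List.find?_cons_of_pos (by simp), List.drop_zero, pvFindEnd_cons,
          if_pos (show PySem.Str.isIn "\\end{IndexedQuestion}" l = true from h)]
        simp
      · rw [if_neg h, List.nil_append]
        have hcg : (pvIdx pvEndP (off + 1) t).find? (fun e => decide (off + ((0 : Nat) : Int) ≤ e)) =
            (pvIdx pvEndP (off + 1) t).find? (fun e => decide ((off + 1) + ((0 : Nat) : Int) ≤ e)) := by
          apply find?_congr'
          intro e he
          have := pvIdx_mem_le pvEndP (off + 1) t e he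
          simp only [decide_eq_decide]
          omega
        rw [hcg, ih (off + 1) 0, List.drop_zero, List.drop_zero, pvFindEnd_cons,
          if_neg (show ¬ PySem.Str.isIn "\\end{IndexedQuestion}" l = true from h),
          show (0 : Int) + 1 = 1 from rfl, pvFindEnd_shift t 1, Option.map_map]
        cases pvFindEnd t 0 <;> simp
    | succ k' =>
      have hstep : ((if pvEndP l then [off] else []) ++ pvIdx pvEndP (off + 1) t).find?
            (fun e => decide (off + ((k' + 1 : Nat) : Int) ≤ e)) =
          (pvIdx pvEndP (off + 1) t).find? (fun e => decide (off + ((k' + 1 : Nat) : Int) ≤ e)) := by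
        by_cases h : pvEndP l
        · rw [if_pos h, List.singleton_append,
            List.find?_cons_of_neg (by simp only [decide_eq_true_eq]; omega)]
        · rw [if_neg h, List.nil_append]
      rw [hstep]
      have hcg : (pvIdx pvEndP (off + 1) t).find? (fun e => decide (off + ((k' + 1 : Nat) : Int) ≤ e)) =
          (pvIdx pvEndP (off + 1) t).find? (fun e => decide ((off + 1) + ((k' : Nat) : Int) ≤ e)) := by
        apply find?_congr'
        intro e _
        simp only [decide_eq_decide]
        omega
      rw [hcg, ih (off + 1) k', List.drop_succ_cons]
      cases pvFindEnd (t.drop k') 0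
      · simp
      · simp; omega

-- the two-pointer merge computes, for each begin index, the first end index ≥ it
theorem pvTP_eq (bs es : List Int) (hs : bs.Pairwise (· ≤ ·)) :
    pvTP bs es =
      bs.flatMap (fun b => ((es.find? (fun e => decide (b ≤ e))).map (fun e => [b, e + 1])).toList) := by
  induction bs generalizing es with
  | nil => simp [pvTP]
  | cons b bs ih =>
    induction es with
    | nil => simp [pvTP]
    | cons e es ihe =>
      by_cases hlt : e < b
      · rw [show pvTP (b :: bs) (e :: es) = pvTP (b :: bs) es by rw [pvTP]; simp [hlt]]
        rw [ihe]
        apply List.flatMap_congr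
        intro b' hb'
        have hbb' : b ≤ b' := by
          rcases List.mem_cons.mp hb' with rfl | h
          · exact le_refl _
          · exact (List.pairwise_cons.mp hs).1 b' h
        rw [List.find?_cons_of_neg (by simp only [decide_eq_true_eq]; omega)]
      · rw [show pvTP (b :: bs) (e :: es) = [b, e + 1] :: pvTP bs (e :: es) by rw [pvTP]; simp [hlt]]
        rw [ih (e :: es) (List.pairwise_cons.mp hs).2, List.flatMap_cons,
          List.find?_cons_of_pos (by simp only [decide_eq_true_eq]; omega)]
        simp

theorem pvScan_eq (lines : List String) :
    pvScan lines = (pvIdx pvBegP 0 lines, pvIdx pvEndP 0 lines) := by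
  unfold pvScan
  rw [PySem.List.foldl_prod_mk
    (f := fun acc (p : Int × String) =>
      if PySem.Str.isIn "begin{IndexedQuestion}" p.2 then acc ++ [p.1] else acc)
    (g := fun acc (p : Int × String) =>
      if PySem.Str.isIn "\\end{IndexedQuestion}" p.2 then acc ++ [p.1] else acc)]
  rw [PySem.List.foldl_append_if (p := fun (p : Int × String) => PySem.Str.isIn "begin{IndexedQuestion}" p.2) (f := (·.1)),
      PySem.List.foldl_append_if (p := fun (p : Int × String) => PySem.Str.isIn "\\end{IndexedQuestion}" p.2) (f := (·.1))]
  simp [pvIdx, pvBegP, pvEndP]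

-- ===== VERDICT (by name: the statement is the Claim_ definition above) =====
theorem get_nr_of_questions_spec : Claim_equal_get_nr_of_questions := by
  intro lines _
  show get_nr_of_questions lines = get_nr_of_questions_alt lines
  have hstep : (fun (st : List (List Int) × Int) (p : Int × String) =>
      if PySem.Str.isIn "begin{IndexedQuestion}" p.2 then
        let nq := st.2 + 1
        let rem := PySem.List.slice lines (some p.1) none
        match pvFindEnd rem 0 with
        | some j => (st.1 ++ [[p.1, p.1 + j + 1]], nq)
        | none => (st.1, nq)
      else st) =
      fun st p =>
        (if PySem.Str.isIn "begin{IndexedQuestion}" p.2 then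
            st.1 ++ ((pvFindEnd (PySem.List.slice lines (some p.1) none) 0).map
              (fun j => [p.1, p.1 + j + 1])).toList
          else st.1,
         if PySem.Str.isIn "begin{IndexedQuestion}" p.2 then st.2 + 1 else st.2) := by
    funext st p
    by_cases h : PySem.Str.isIn "begin{IndexedQuestion}" p.2
    · rw [if_pos h, if_pos h, if_pos h]
      show (match pvFindEnd (PySem.List.slice lines (some p.1) none) 0 with
            | some j => (st.1 ++ [[p.1, p.1 + j + 1]], st.2 + 1)
            | none => (st.1, st.2 + 1)) = _
      cases pvFindEnd (PySem.List.slice lines (some p.1) none) 0 <;> simp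
    · rw [if_neg h, if_neg h, if_neg h]
  have halt : get_nr_of_questions_alt lines =
      (pvTP (pvIdx pvBegP 0 lines) (pvIdx pvEndP 0 lines), ((pvIdx pvBegP 0 lines).length : Int)) := by
    show (pvTP (pvScan lines).1 (pvScan lines).2, ((pvScan lines).1.length : Int)) = _
    rw [pvScan_eq]
  have hcount : (PySem.List.enumerate lines 0).foldl
      (fun acc (p : Int × String) => if pvBegP p.2 then acc + 1 else acc) (0 : Int) =
      ((pvIdx pvBegP 0 lines).length : Int) := by
    rw [PySem.List.foldl_if_add_one]
    simp [pvIdx, List.countP_eq_length_filter]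
  have hpairs : (PySem.List.enumerate lines 0).foldl
      (fun acc (p : Int × String) =>
        if pvBegP p.2 then
          acc ++ ((pvFindEnd (PySem.List.slice lines (some p.1) none) 0).map
            (fun j => [p.1, p.1 + j + 1])).toList
        else acc) [] =
      pvTP (pvIdx pvBegP 0 lines) (pvIdx pvEndP 0 lines) := by
    rw [PySem.List.foldl_congr_mem (PySem.List.enumerate lines 0) _
      (fun acc (p : Int × String) =>
        acc ++ (if pvBegP p.2 then
          ((pvFindEnd (PySem.List.slice lines (some p.1) none) 0).map
            (fun j => [p.1, p.1 + j + 1])).toList else [])) []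
      (by intro acc x _; by_cases h : pvBegP x.2 <;> simp [h])]
    rw [PySem.List.foldl_append_eq_flatMap, List.nil_append, flatMap_if_eq_filter]
    rw [pvTP_eq _ _ (pvIdx_pairwise pvBegP 0 lines)]
    rw [show pvIdx pvBegP 0 lines =
        ((PySem.List.enumerate lines 0).filter (fun p => pvBegP p.2)).map (·.1) from rfl,
      List.flatMap_map]
    apply List.flatMap_congr
    intro p hp
    have h0 : 0 ≤ p.1 := by
      have hm : p.1 ∈ pvIdx pvBegP 0 lines := by
        simp only [pvIdx]
        exact List.mem_map.mpr ⟨p, hp, rfl⟩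
      exact pvIdx_mem_le pvBegP 0 lines p.1 hm
    show ((pvFindEnd (PySem.List.slice lines (some p.1) none) 0).map
        (fun j => [p.1, p.1 + j + 1])).toList =
      (((pvIdx pvEndP 0 lines).find? (fun e => decide (p.1 ≤ e))).map
        (fun e => [p.1, e + 1])).toList
    have hcg : ((pvIdx pvEndP 0 lines).find? (fun e => decide (p.1 ≤ e))) =
        ((pvIdx pvEndP 0 lines).find? (fun e => decide ((0 : Int) + ((p.1.toNat : Nat) : Int) ≤ e))) := by
      apply find?_congr'
      intro e _
      simp only [decide_eq_decide]
      omega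
    rw [hcg, pvFind_drop lines 0 p.1.toNat, PySem.List.slice_from _ h0]
    cases pvFindEnd (lines.drop p.1.toNat) 0
    · simp
    · simp; omega
  unfold get_nr_of_questions
  rw [hstep]
  rw [PySem.List.foldl_prod_mk
    (f := fun acc (p : Int × String) =>
      if PySem.Str.isIn "begin{IndexedQuestion}" p.2 then
        acc ++ ((pvFindEnd (PySem.List.slice lines (some p.1) none) 0).map
          (fun j => [p.1, p.1 + j + 1])).toList
      else acc)
    (g := fun acc (p : Int × String) =>
      if PySem.Str.isIn "begin{IndexedQuestion}" p.2 then acc + 1 else acc)]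
  simp only [pvBegP_eq]
  rw [halt]
  exact Prod.ext hpairs hcount
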